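-- pv_equiv track=rewrite | github.com/iafisher/oeuvre | oeuvre.py | get_enclosing_locations
-- ===== SOURCE A (Python) =====
-- from typing import Dict, Iterable, List, Optional, Set, Tuple, Union
--
-- def get_enclosing_locations(locdb: Dict[str, List[str]], location: str) -> List[str]:
--     """
--     Returns all locations that include the given location in the database.
--     """
--     if location in locdb:
--         direct_enclosing = locdb[location]
--         indirect_enclosing = []
--         for enclosing in direct_enclosing:
--             indirect_enclosing.extend(get_enclosing_locations(locdb, enclosing))
--         return direct_enclosing + indirect_enclosing
--     else:
--         return []
-- ===== SOURCE B (Python) =====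
-- def get_enclosing_locations(locdb, location):
--     """
--     Returns all locations that include the given location in the database.
--     Memoized: each location's full enclosing list is computed once and cached.
--     """
--     cache = {}
--
--     def solve(loc):
--         cached = cache.get(loc)
--         if cached is not None:
--             return cached
--         direct = locdb.get(loc)
--         if direct is None:
--             cache[loc] = []
--             return []
--         out = list(direct)
--         for enclosing in direct:
--             out.extend(solve(enclosing))
--         cache[loc] = out
--         return out
--
--     return solve(location)
-- ===== Notes on version B (the rewrite author's own statement) =====
-- stated objective: alternative
-- what changed: B replaces A's naive exponential-recursion re-entry with a memoized depth-first traversal: a cache dict stores each location's full enclosing list the first time it is computed, so shared locations are never recursed into twice (the result lists themselves are identical, duplicates and order included).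
import Mathlib
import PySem

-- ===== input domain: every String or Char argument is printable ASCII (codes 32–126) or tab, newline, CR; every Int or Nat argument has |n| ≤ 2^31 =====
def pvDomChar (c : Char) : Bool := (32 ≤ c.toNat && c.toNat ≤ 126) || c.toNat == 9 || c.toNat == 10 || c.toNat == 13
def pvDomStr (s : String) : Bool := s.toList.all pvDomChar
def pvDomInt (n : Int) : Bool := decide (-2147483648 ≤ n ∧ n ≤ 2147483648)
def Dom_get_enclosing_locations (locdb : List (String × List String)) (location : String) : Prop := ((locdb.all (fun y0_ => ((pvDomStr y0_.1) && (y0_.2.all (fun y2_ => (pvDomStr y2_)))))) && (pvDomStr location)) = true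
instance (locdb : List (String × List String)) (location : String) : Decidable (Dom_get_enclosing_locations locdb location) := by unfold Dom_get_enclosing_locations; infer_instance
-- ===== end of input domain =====

-- B memoizes the recursion with a cache dict threaded through the traversal (objective: alternative
-- structure; avoids re-entering already-solved locations on shared DAGs). Same return value as A on
-- every acyclic database (Pre_); on cyclic ones both Pythons raise RecursionError.

-- shared dict-lookup primitive (Python `location in locdb` / `locdb[location]`, first match)
def pvLookup : List (String × List String) → String → Option (List String)
  | [], _ => none
  | (k, v) :: rest, x => if k = x then some v else pvLookup rest x

-- ===== PORT A =====
-- A's recursion is not structurally terminating (it loops forever on a cyclic db, where Python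
-- raises RecursionError); it is ported with a fuel parameter.  Under Pre_ (acyclicity of the part
-- reachable from `location`) the recursion depth is at most locdb.length + 1, so the fuel
-- locdb.length + 1 is never exhausted (proved below) and the port computes exactly what A computes.
def pvGeA (locdb : List (String × List String)) : Nat → String → List String
  | 0, _ => []
  | Nat.succ n, loc =>
    match pvLookup locdb loc with
    | some direct =>
        let indirect := direct.foldl (fun acc e => acc ++ pvGeA locdb n e) []
        direct ++ indirect
    | none => []

def get_enclosing_locations (locdb : List (String × List String)) (location : String) : List String :=
  pvGeA locdb (locdb.length + 1) location

-- ===== PORT B =====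
-- fuelled like A's port; the cache (Python dict) is threaded through the fold over `direct`
def pvGeB (locdb : List (String × List String)) :
    Nat → PySem.Dict String (List String) → String → List String × PySem.Dict String (List String)
  | 0, c, _ => ([], c)
  | Nat.succ n, c, loc =>
    match PySem.Dict.get? c loc with
    | some v => (v, c)
    | none =>
      match pvLookup locdb loc with
      | none => ([], PySem.Dict.insert c loc [])
      | some direct =>
        let r := direct.foldl
          (fun (acc : List String × PySem.Dict String (List String)) e =>
            let p := pvGeB locdb n acc.2 e
            (acc.1 ++ p.1, p.2)) ([], c)
        (direct ++ r.1, PySem.Dict.insert r.2 loc (direct ++ r.1))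

def get_enclosing_locations_alt (locdb : List (String × List String)) (location : String) : List String :=
  (pvGeB locdb (locdb.length + 1) PySem.Dict.empty location).1

-- ===== PRECONDITION & SPEC =====
-- graph machinery for the precondition: bounded transitive closure of the "encloses" edges
def pvSuccs (locdb : List (String × List String)) (x : String) : List String :=
  (List.lookup x locdb).getD []

def pvStepC (locdb : List (String × List String)) (s : Finset String) : Finset String :=
  s ∪ s.biUnion (fun x => (pvSuccs locdb x).toFinset)

def pvIterC (locdb : List (String × List String)) : Nat → Finset String → Finset String
  | 0, s => s
  | Nat.succ n, s => pvIterC locdb n (pvStepC locdb s)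

def pvVals (locdb : List (String × List String)) : Finset String :=
  (locdb.flatMap Prod.snd).toFinset

-- pvReach locdb x = everything reachable from x in ≥ 1 step (saturated closure, proved below)
def pvReach (locdb : List (String × List String)) (x : String) : Finset String :=
  pvIterC locdb (pvVals locdb).card ((pvSuccs locdb x).toFinset)

-- Pre_: no key that the recursion can visit (location itself or reachable from it) lies on a cycle.
-- Exactly there Python A (and B) recurses forever / raises RecursionError; cycles elsewhere in the
-- database are irrelevant and stay inside Pre_.
def Pre_get_enclosing_locations (locdb : List (String × List String)) (location : String) : Prop :=
  ∀ p ∈ locdb, (p.1 = location ∨ p.1 ∈ pvReach locdb location) → p.1 ∉ pvReach locdb p.1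

instance (locdb : List (String × List String)) (location : String) :
    Decidable (Pre_get_enclosing_locations locdb location) := by
  unfold Pre_get_enclosing_locations; infer_instance

def pvWitness_get_enclosing_locations : (List (String × List String)) × String :=
  ([("a", ["b", "c"]), ("b", ["c"]), ("c", [])], "a")

def Spec_get_enclosing_locations (locdb : List (String × List String)) (location : String) (out : List String) : Prop := out = get_enclosing_locations_alt locdb location
instance (locdb : List (String × List String)) (location : String) (out : List String) : Decidable (Spec_get_enclosing_locations locdb location out) := by unfold Spec_get_enclosing_locations; infer_instance

-- ===== CLAIM (what is proved, stated in full; the proofs are below) =====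
def Claim_equal_get_enclosing_locations : Prop := ∀ (locdb : List (String × List String)) (location : String), Dom_get_enclosing_locations locdb location → Pre_get_enclosing_locations locdb location → Spec_get_enclosing_locations locdb location (get_enclosing_locations locdb location)

-- ===== LEMMAS AND PROOFS =====

theorem pvLookup_eq_lookup (locdb : List (String × List String)) (x : String) :
    pvLookup locdb x = List.lookup x locdb := by
  induction locdb with
  | nil => rfl
  | cons p rest ih =>
    obtain ⟨k, w⟩ := p
    simp only [pvLookup, List.lookup, ih]
    by_cases hk : k = x
    · simp [hk]
    · have : (x == k) = false := by simp [Ne.symm hk]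
      simp [hk, this]

theorem pvLookup_mem_snd {locdb : List (String × List String)} {x : String} {v : List String}
    (h : pvLookup locdb x = some v) : v ∈ locdb.map Prod.snd := by
  induction locdb with
  | nil => simp [pvLookup] at h
  | cons p rest ih =>
    obtain ⟨k, w⟩ := p
    simp only [pvLookup] at h
    by_cases hk : k = x
    · simp [hk] at h; simp [← h]
    · simp [hk] at h; simp [ih h]

theorem pvLookup_isSome_iff_mem_keys {locdb : List (String × List String)} {x : String} :
    (pvLookup locdb x).isSome ↔ x ∈ locdb.map Prod.fst := by
  induction locdb with
  | nil => simp [pvLookup]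
  | cons p rest ih =>
    obtain ⟨k, w⟩ := p
    by_cases hk : k = x
    · simp [pvLookup, hk]
    · simp only [pvLookup]
      rw [if_neg hk]
      simp only [ih, List.map_cons, List.mem_cons]
      constructor
      · exact Or.inr
      · rintro (h | h)
        · exact absurd h.symm hk
        · exact h

theorem subset_pvStepC (locdb : List (String × List String)) (s : Finset String) :
    s ⊆ pvStepC locdb s := Finset.subset_union_left

theorem pvSuccs_subset_vals (locdb : List (String × List String)) (x : String) :
    (pvSuccs locdb x).toFinset ⊆ pvVals locdb := by
  intro y hy
  simp only [List.mem_toFinset] at hy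
  unfold pvSuccs at hy
  rw [← pvLookup_eq_lookup] at hy
  unfold pvVals
  cases h : pvLookup locdb x with
  | none => simp [h] at hy
  | some v =>
    simp only [h, Option.getD_some] at hy
    have := pvLookup_mem_snd h
    simp only [List.mem_toFinset, List.mem_flatMap]
    simp only [List.mem_map] at this
    obtain ⟨p, hp, hpv⟩ := this
    exact ⟨p, hp, hpv ▸ hy⟩

theorem pvStepC_subset_vals (locdb : List (String × List String)) {s : Finset String}
    (hs : s ⊆ pvVals locdb) : pvStepC locdb s ⊆ pvVals locdb := by
  unfold pvStepC
  apply Finset.union_subset hs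
  intro y hy
  simp only [Finset.mem_biUnion] at hy
  obtain ⟨x, _, hx⟩ := hy
  exact pvSuccs_subset_vals locdb x hx

theorem pvIterC_of_fix (locdb : List (String × List String)) {s : Finset String}
    (hfix : pvStepC locdb s = s) : ∀ n, pvIterC locdb n s = s := by
  intro n
  induction n with
  | zero => rfl
  | succ n ih => simp only [pvIterC, hfix, ih]

theorem subset_pvIterC (locdb : List (String × List String)) :
    ∀ (n : Nat) (s : Finset String), s ⊆ pvIterC locdb n s := by
  intro n
  induction n with
  | zero => intro s; exact subset_refl s
  | succ n ih =>
    intro s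
    exact subset_trans (subset_pvStepC locdb s) (ih (pvStepC locdb s))

theorem pvIterC_saturates (locdb : List (String × List String)) :
    ∀ (n : Nat) (s : Finset String), s ⊆ pvVals locdb → (pvVals locdb).card ≤ n + s.card →
      pvStepC locdb (pvIterC locdb n s) = pvIterC locdb n s := by
  intro n
  induction n with
  | zero =>
    intro s hsub hcard
    have : s = pvVals locdb := Finset.eq_of_subset_of_card_le hsub (by omega)
    subst this
    simp only [pvIterC]
    exact Finset.Subset.antisymm (pvStepC_subset_vals locdb (subset_refl _)) (subset_pvStepC locdb _)
  | succ n ih =>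
    intro s hsub hcard
    by_cases hfix : pvStepC locdb s = s
    · rw [pvIterC_of_fix locdb hfix]
      exact hfix
    · have hss : s ⊂ pvStepC locdb s :=
        Finset.ssubset_iff_subset_ne.mpr ⟨subset_pvStepC locdb s, fun h => hfix h.symm⟩
      have hcard' : s.card < (pvStepC locdb s).card := Finset.card_lt_card hss
      simp only [pvIterC]
      exact ih (pvStepC locdb s) (pvStepC_subset_vals locdb hsub) (by omega)

theorem pvReach_fix (locdb : List (String × List String)) (x : String) :
    pvStepC locdb (pvReach locdb x) = pvReach locdb x := by
  unfold pvReach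
  exact pvIterC_saturates locdb _ _ (pvSuccs_subset_vals locdb x) (by omega)

-- closure property: reach is closed under taking successors
theorem pvReach_closed {locdb : List (String × List String)} {x y z : String}
    (hy : y ∈ pvReach locdb x) (hz : z ∈ pvSuccs locdb y) : z ∈ pvReach locdb x := by
  have : z ∈ pvStepC locdb (pvReach locdb x) := by
    unfold pvStepC
    apply Finset.mem_union_right
    simp only [Finset.mem_biUnion]
    exact ⟨y, hy, by simpa using hz⟩
  rwa [pvReach_fix locdb x] at this

theorem mem_pvReach_of_succ {locdb : List (String × List String)} {x e : String}
    (h : e ∈ pvSuccs locdb x) : e ∈ pvReach locdb x := by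
  unfold pvReach
  exact subset_pvIterC locdb _ _ (by simpa using h)

-- the keys of the database, and the "ancestors" measure for termination depth
def pvKeysF (locdb : List (String × List String)) : Finset String :=
  (locdb.map Prod.fst).toFinset

def pvAnc (locdb : List (String × List String)) (x : String) : Finset String :=
  (pvKeysF locdb).filter (fun k => x ∈ pvReach locdb k)

theorem pvAnc_subset (locdb : List (String × List String)) (x : String) :
    pvAnc locdb x ⊆ pvKeysF locdb := Finset.filter_subset _ _

theorem pvKeysF_card_le (locdb : List (String × List String)) :
    (pvKeysF locdb).card ≤ locdb.length := by
  calc (pvKeysF locdb).card ≤ (locdb.map Prod.fst).length := List.toFinset_card_le _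
    _ = locdb.length := List.length_map ..

theorem pvFoldl_append_shift (f : String → List String) :
    ∀ (l : List String) (a b : List String),
      l.foldl (fun acc e => acc ++ f e) (a ++ b) = a ++ l.foldl (fun acc e => acc ++ f e) b := by
  intro l
  induction l with
  | nil => intro a b; rfl
  | cons x xs ihx =>
    intro a b
    simp only [List.foldl_cons, List.append_assoc, ihx]

theorem pvFoldl_append_congr {f g : String → List String} :
    ∀ (l : List String), (∀ e ∈ l, f e = g e) → ∀ (init : List String),
      l.foldl (fun acc e => acc ++ f e) init = l.foldl (fun acc e => acc ++ g e) init := by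
  intro l
  induction l with
  | nil => intro _ init; rfl
  | cons d ds ihd =>
    intro h init
    simp only [List.foldl_cons, h d (by simp)]
    exact ihd (fun e he => h e (by simp [he])) _

-- the crucial strict decrease: along an edge loc → e out of a visited key, the ancestor set grows
theorem pvAnc_lt (locdb : List (String × List String)) (location : String)
    (hpre : Pre_get_enclosing_locations locdb location)
    {loc e : String} (hvis : loc = location ∨ loc ∈ pvReach locdb location)
    {direct : List String} (hkey : pvLookup locdb loc = some direct)
    (he : e ∈ direct) :
    (pvAnc locdb loc).card < (pvAnc locdb e).card := by
  have hesucc : e ∈ pvSuccs locdb loc := by simp [pvSuccs, ← pvLookup_eq_lookup, hkey, he]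
  have hlockey : loc ∈ pvKeysF locdb := by
    unfold pvKeysF
    rw [List.mem_toFinset]
    exact pvLookup_isSome_iff_mem_keys.mp (by simp [hkey])
  have hlocnotself : loc ∉ pvReach locdb loc := by
    have : loc ∈ locdb.map Prod.fst := by simpa [pvKeysF] using hlockey
    obtain ⟨p, hp, hp1⟩ := List.mem_map.mp this
    exact hp1 ▸ hpre p hp (hp1 ▸ hvis)
  apply Finset.card_lt_card
  rw [Finset.ssubset_iff_of_subset]
  · exact ⟨loc, by simp [pvAnc, hlockey, mem_pvReach_of_succ hesucc],
          by simp [pvAnc, hlocnotself]⟩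
  · intro k hk
    simp only [pvAnc, Finset.mem_filter] at hk ⊢
    exact ⟨hk.1, pvReach_closed hk.2 hesucc⟩
  
-- children of a visited node are visited
theorem pvVisited_succ {locdb : List (String × List String)} {location loc e : String}
    (hvis : loc = location ∨ loc ∈ pvReach locdb location)
    {direct : List String} (hkey : pvLookup locdb loc = some direct) (he : e ∈ direct) :
    e = location ∨ e ∈ pvReach locdb location := by
  have hesucc : e ∈ pvSuccs locdb loc := by simp [pvSuccs, ← pvLookup_eq_lookup, hkey, he]
  right
  cases hvis with
  | inl h => exact h ▸ mem_pvReach_of_succ hesucc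
  | inr h => exact pvReach_closed h hesucc

-- fuel irrelevance for A's port: any two sufficient fuels give the same result
theorem pvGeA_stable (locdb : List (String × List String)) (location : String)
    (hpre : Pre_get_enclosing_locations locdb location) :
    ∀ (n m : Nat) (loc : String), (loc = location ∨ loc ∈ pvReach locdb location) →
      (pvKeysF locdb).card + 1 ≤ (pvAnc locdb loc).card + n →
      (pvKeysF locdb).card + 1 ≤ (pvAnc locdb loc).card + m →
      pvGeA locdb n loc = pvGeA locdb m loc := by
  intro n
  induction n with
  | zero =>
    intro m loc _ hn _
    have := Finset.card_le_card (pvAnc_subset locdb loc)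
    omega
  | succ n ih =>
    intro m loc hvis hn hm
    have hanc := Finset.card_le_card (pvAnc_subset locdb loc)
    match m with
    | 0 => omega
    | Nat.succ m' =>
      simp only [pvGeA]
      cases hkey : pvLookup locdb loc with
      | none => rfl
      | some direct =>
        have harg : ∀ e ∈ direct, pvGeA locdb n e = pvGeA locdb m' e := by
          intro e he
          have hlt := pvAnc_lt locdb location hpre hvis hkey he
          exact ih m' e (pvVisited_succ hvis hkey he) (by omega) (by omega)
        simp only [pvFoldl_append_congr direct harg]

-- F = the canonical value (A's port at its top-level fuel)
def pvF (locdb : List (String × List String)) (location : String) : List String :=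
  pvGeA locdb (locdb.length + 1) location

-- cache invariant: every cached value is the canonical value of its key
def pvCacheOK (locdb : List (String × List String)) (c : PySem.Dict String (List String)) : Prop :=
  ∀ k v, PySem.Dict.get? c k = some v → v = pvF locdb k

theorem pvCacheOK_empty (locdb : List (String × List String)) :
    pvCacheOK locdb PySem.Dict.empty := by
  intro k v h
  simp [PySem.Dict.get?_empty] at h

theorem pvCacheOK_insert {locdb : List (String × List String)}
    {c : PySem.Dict String (List String)} (hc : pvCacheOK locdb c)
    {loc : String} {v : List String} (hv : v = pvF locdb loc) :
    pvCacheOK locdb (PySem.Dict.insert c loc v) := by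
  intro k w h
  rw [PySem.Dict.get?_insert] at h
  by_cases hk : k = loc
  · simp [hk] at h; exact h ▸ hk ▸ hv
  · simp [hk] at h; exact hc k w h

-- main lemma: B's memoized recursion computes the canonical value and preserves the invariant
theorem pvGeB_correct (locdb : List (String × List String)) (location : String)
    (hpre : Pre_get_enclosing_locations locdb location) :
    ∀ (n : Nat) (loc : String) (c : PySem.Dict String (List String)),
      (loc = location ∨ loc ∈ pvReach locdb location) →
      (pvKeysF locdb).card + 1 ≤ (pvAnc locdb loc).card + n →
      pvCacheOK locdb c →
      (pvGeB locdb n c loc).1 = pvF locdb loc ∧ pvCacheOK locdb (pvGeB locdb n c loc).2 := by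
  intro n
  induction n with
  | zero =>
    intro loc c _ hn _
    have := Finset.card_le_card (pvAnc_subset locdb loc)
    omega
  | succ n ih =>
    intro loc c hvis hn hc
    simp only [pvGeB]
    cases hhit : PySem.Dict.get? c loc with
    | some v =>
      exact ⟨(hc loc v hhit).symm ▸ (hc loc v hhit), hc⟩
    | none =>
      cases hkey : pvLookup locdb loc with
      | none =>
        constructor
        · show ([] : List String) = pvF locdb loc
          unfold pvF
          simp [pvGeA, hkey]
        · exact pvCacheOK_insert hc (by unfold pvF; simp [pvGeA, hkey])
      | some direct =>
        -- the fold over direct, threading the cache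
        have hfold : ∀ (es : List String), (∀ e ∈ es, e ∈ direct) →
            ∀ (acc : List String) (c0 : PySem.Dict String (List String)), pvCacheOK locdb c0 →
            (es.foldl (fun (acc : List String × PySem.Dict String (List String)) e =>
                let p := pvGeB locdb n acc.2 e
                (acc.1 ++ p.1, p.2)) (acc, c0)).1
              = acc ++ es.foldl (fun acc e => acc ++ pvF locdb e) [] ∧
            pvCacheOK locdb
              (es.foldl (fun (acc : List String × PySem.Dict String (List String)) e =>
                let p := pvGeB locdb n acc.2 e
                (acc.1 ++ p.1, p.2)) (acc, c0)).2 := by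
          intro es
          induction es with
          | nil => intro _ acc c0 hc0; exact ⟨by simp, hc0⟩
          | cons d ds ihd =>
            intro hsub acc c0 hc0
            have hd : d ∈ direct := hsub d (by simp)
            have hlt := pvAnc_lt locdb location hpre hvis hkey hd
            have hrec := ih d c0 (pvVisited_succ hvis hkey hd) (by omega) hc0
            simp only [List.foldl_cons]
            obtain ⟨h1, h2⟩ := ihd (fun e he => hsub e (by simp [he]))
              (acc ++ (pvGeB locdb n c0 d).1) (pvGeB locdb n c0 d).2 hrec.2
            refine ⟨?_, h2⟩
            rw [h1, hrec.1]
            have hshift := pvFoldl_append_shift (fun e => pvF locdb e) ds (pvF locdb d) []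
            simp only [List.append_nil] at hshift
            simp only [List.nil_append, hshift, List.append_assoc]
        have hmain := hfold direct (fun e he => he) [] c hc
        have hFval : pvF locdb loc = direct ++
            direct.foldl (fun acc e => acc ++ pvF locdb e) [] := by
          have h1 : pvF locdb loc = direct ++
              direct.foldl (fun acc e => acc ++ pvGeA locdb locdb.length e) [] := by
            unfold pvF
            simp only [pvGeA, hkey]
          rw [h1]
          congr 1
          apply pvFoldl_append_congr
          intro e he
          unfold pvF
          apply pvGeA_stable locdb location hpre _ _ e (pvVisited_succ hvis hkey he)
          · have h1 := pvAnc_lt locdb location hpre hvis hkey he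
            have h2 := pvKeysF_card_le locdb
            omega
          · have h2 := pvKeysF_card_le locdb
            omega
        constructor
        · show direct ++ _ = pvF locdb loc
          rw [hmain.1, hFval]
          simp
        · apply pvCacheOK_insert hmain.2
          rw [hmain.1, hFval]
          simp
  
-- ===== VERDICT (by name: the statement is the Claim_ definition above) =====
theorem get_enclosing_locations_spec : Claim_equal_get_enclosing_locations := by
  intro locdb location _ hpre
  unfold Spec_get_enclosing_locations get_enclosing_locations get_enclosing_locations_alt
  have hcard := pvKeysF_card_le locdb
  have := pvGeB_correct locdb location hpre (locdb.length + 1) location PySem.Dict.empty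
    (Or.inl rfl) (by omega) (pvCacheOK_empty locdb)
  rw [this.1]
  rfl
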